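-- pv_equiv track=rewrite | github.com/a0lex1/cryptor | common/string_repl_positions.py | string_repl_positions
-- ===== SOURCE A (Python) =====
-- def string_repl_positions(s, positions, replacements):
--   ret = ''
--   assert (len(positions) == len(replacements))
--   x = 0
--   for i in range(len(positions)):
--     start, end = positions[i]
--     cut1 = s[x:start]
--     if i == len(positions) - 1:  # last iter?
--       cut2 = s[end:]
--     else:
--       next_start, next_end = positions[i + 1]
--       cut2 = s[end:next_start]
--     ret += cut1
--     ret += replacements[i]
--     x = end
--   ret += s[x:] # the rest of string if present
--   return ret
-- ===== SOURCE B (Python) =====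
-- def string_repl_positions(s, positions, replacements):
--   assert (len(positions) == len(replacements))
--   gap_starts = [0] + [end for (start, end) in positions]
--   gap_ends = [start for (start, end) in positions] + [len(s)]
--   gaps = [s[a:b] for a, b in zip(gap_starts, gap_ends)]
--   parts = []
--   for g, r in zip(gaps, replacements):
--     parts.append(g)
--     parts.append(r)
--   parts.append(gaps[-1])
--   return ''.join(parts)
-- ===== Notes on version B (the rewrite author's own statement) =====
-- stated objective: simpler
-- what changed: B precomputes all gap boundaries ([0]+ends, starts+[len(s)]) and the n+1 gap substrings in one zip pass, then interleaves gaps with replacements and joins once, dropping A's running cursor x, its incremental string concatenation and the dead cut2 branch.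
import Mathlib
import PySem

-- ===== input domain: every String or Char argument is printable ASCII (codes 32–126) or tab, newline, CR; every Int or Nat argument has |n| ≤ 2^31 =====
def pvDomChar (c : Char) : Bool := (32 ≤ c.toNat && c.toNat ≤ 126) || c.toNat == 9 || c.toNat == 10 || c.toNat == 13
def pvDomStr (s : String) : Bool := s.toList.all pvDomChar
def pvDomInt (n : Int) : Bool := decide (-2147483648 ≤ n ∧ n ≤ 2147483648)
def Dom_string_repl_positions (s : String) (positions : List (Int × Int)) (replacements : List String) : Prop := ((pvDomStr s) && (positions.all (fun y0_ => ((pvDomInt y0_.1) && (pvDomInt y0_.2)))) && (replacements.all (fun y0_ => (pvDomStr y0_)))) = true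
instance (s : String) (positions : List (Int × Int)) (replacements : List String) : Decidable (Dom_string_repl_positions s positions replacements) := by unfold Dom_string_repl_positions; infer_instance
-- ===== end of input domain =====

-- B precomputes all gap boundaries and the gap substrings in one zip pass, then
-- interleaves them with the replacements and joins once, instead of A's
-- running-cursor loop with incremental concatenation and a dead cut2 branch
-- (objective: simpler).


-- ===== PORT A =====
-- loop body of A's 'for i in range(len(positions))'; state = (ret, x)
def pvStepA (cs : List Char) (positions : List (Int × Int)) (replacements : List String)
    (acc : List Char × Int) (i : Int) : List Char × Int :=
  let ret := acc.1
  let x := acc.2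
  let p := PySem.List.pyGetD positions i ((0 : Int), (0 : Int))
  let start := p.1
  let e := p.2
  let cut1 := PySem.List.slice cs (some x) (some start)
  let _cut2 :=                                -- computed by A, never used (dead code kept)
    if i == (positions.length : Int) - 1 then
      PySem.List.slice cs (some e) none
    else
      PySem.List.slice cs (some e)
        (some (PySem.List.pyGetD positions (i + 1) ((0 : Int), (0 : Int))).1)
  (ret ++ cut1 ++ (PySem.List.pyGetD replacements i "").toList, e)

def string_repl_positions (s : String) (positions : List (Int × Int)) (replacements : List String) : String :=
  let cs := s.toList
  let fin := (PySem.List.pyRange 0 (positions.length : Int) 1).foldl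
    (pvStepA cs positions replacements) ([], 0)
  String.ofList (fin.1 ++ PySem.List.slice cs (some fin.2) none)

-- ===== PORT B =====
def string_repl_positions_alt (s : String) (positions : List (Int × Int)) (replacements : List String) : String :=
  let cs := s.toList
  let gapStarts : List Int := 0 :: positions.map (fun p => p.2)
  let gapEnds : List Int := positions.map (fun p => p.1) ++ [(cs.length : Int)]
  let gaps : List String :=
    (gapStarts.zip gapEnds).map (fun ab => String.ofList (PySem.List.slice cs (some ab.1) (some ab.2)))
  let parts : List String :=
    (gaps.zip replacements).foldl (fun acc gr => acc ++ [gr.1, gr.2]) []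
  let parts := parts ++ [PySem.List.pyGetD gaps (-1) ""]
  PySem.Str.join "" parts

-- ===== PRECONDITION & SPEC =====
-- A (and B) raise AssertionError iff the two lists differ in length; Pre_ excludes exactly that.
def Pre_string_repl_positions (s : String) (positions : List (Int × Int)) (replacements : List String) : Prop :=
  positions.length = replacements.length
instance (s : String) (positions : List (Int × Int)) (replacements : List String) : Decidable (Pre_string_repl_positions s positions replacements) := by unfold Pre_string_repl_positions; infer_instance

def pvWitness_string_repl_positions : String × (List (Int × Int)) × List String :=
  ("hello", [((1 : Int), (3 : Int))], ["XY"])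

def Spec_string_repl_positions (s : String) (positions : List (Int × Int)) (replacements : List String) (out : String) : Prop := out = string_repl_positions_alt s positions replacements
instance (s : String) (positions : List (Int × Int)) (replacements : List String) (out : String) : Decidable (Spec_string_repl_positions s positions replacements out) := by unfold Spec_string_repl_positions; infer_instance

-- ===== CLAIM (what is proved, stated in full; the proofs are below) =====
def Claim_equal_string_repl_positions : Prop := ∀ (s : String) (positions : List (Int × Int)) (replacements : List String), Dom_string_repl_positions s positions replacements → Pre_string_repl_positions s positions replacements → Spec_string_repl_positions s positions replacements (string_repl_positions s positions replacements)

-- ===== LEMMAS AND PROOFS =====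

-- the shape both programs compute: alternate gap slices and replacements
def pvInterleave (cs : List Char) (x : Int) : List (Int × Int) → List String → List Char
  | (st, e) :: ps, r :: rs =>
      PySem.List.slice cs (some x) (some st) ++ r.toList ++ pvInterleave cs e ps rs
  | _, _ => PySem.List.slice cs (some x) none

-- B's gap list, with the leading boundary generalized from 0 to x
def pvGaps (cs : List Char) (x : Int) (ps : List (Int × Int)) : List String :=
  ((x :: ps.map (fun p => p.2)).zip (ps.map (fun p => p.1) ++ [(cs.length : Int)])).map
    (fun ab => String.ofList (PySem.List.slice cs (some ab.1) (some ab.2)))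

theorem pv_slice_to_len (cs : List Char) (x : Int) :
    PySem.List.slice cs (some x) (some (cs.length : Int)) = PySem.List.slice cs (some x) none := by
  simp [PySem.List.slice]

theorem pvGaps_nil (cs : List Char) (x : Int) :
    pvGaps cs x [] = [String.ofList (PySem.List.slice cs (some x) (some (cs.length : Int)))] := by
  simp [pvGaps]

theorem pvGaps_cons (cs : List Char) (x st e : Int) (ps : List (Int × Int)) :
    pvGaps cs x ((st, e) :: ps)
      = String.ofList (PySem.List.slice cs (some x) (some st)) :: pvGaps cs e ps := by
  simp [pvGaps]

theorem pvGaps_ne_nil (cs : List Char) (x : Int) (ps : List (Int × Int)) :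
    pvGaps cs x ps ≠ [] := by
  cases ps with
  | nil => simp [pvGaps_nil]
  | cons p t => cases p; rw [pvGaps_cons]; simp

theorem pv_pyGetD_neg_one {α : Type} (xs : List α) (d : α) (h : xs ≠ []) :
    PySem.List.pyGetD xs (-1) d = xs.getLast h := by
  have hn : 0 < xs.length := List.length_pos_iff.mpr h
  simp only [PySem.List.pyGetD, PySem.List.pyGet?, PySem.List.pyIdx?]
  have h1 : ¬ (0 : Int) ≤ -1 := by omega
  have h2 : -(xs.length : Int) ≤ -1 := by omega
  have h3 : (-(-1 : Int)).toNat = 1 := by decide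
  simp only [h1, if_false, h2, if_true, h3]
  simp [List.getElem?_eq_getElem (show xs.length - 1 < xs.length by omega),
    List.getLast_eq_getElem]

theorem pv_flatten_intersperse {α : Type} (l : List (List α)) :
    (List.intersperse ([] : List α) l).flatten = l.flatten := by
  induction l with
  | nil => rfl
  | cons a t ih =>
    cases t with
    | nil => rfl
    | cons b t' => simp_all

theorem pv_join_nil (parts : List String) :
    (PySem.Str.join "" parts).toList = (parts.map String.toList).flatten := by
  rw [PySem.Str.toList_join]
  simp [PySem.Chars.join, List.intercalate, pv_flatten_intersperse]

-- B's parts, joined, equal the interleave shape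
theorem pvB_core (cs : List Char) :
    ∀ (ps : List (Int × Int)) (rs : List String), ps.length = rs.length → ∀ (x : Int),
    ((((pvGaps cs x ps).zip rs).flatMap (fun gr => [gr.1, gr.2])
        ++ [PySem.List.pyGetD (pvGaps cs x ps) (-1) ""]).map String.toList).flatten
      = pvInterleave cs x ps rs := by
  intro ps
  induction ps with
  | nil =>
    intro rs hlen x
    have hrs : rs = [] := List.eq_nil_of_length_eq_zero (by simpa using hlen.symm)
    subst hrs
    rw [pvGaps_nil]
    rw [pv_pyGetD_neg_one _ _ (by simp)]
    simp [pvInterleave, pv_slice_to_len]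
  | cons p t ih =>
    intro rs hlen x
    cases rs with
    | nil => simp at hlen
    | cons r rs' =>
      obtain ⟨st, e⟩ := p
      rw [pvGaps_cons]
      rw [pv_pyGetD_neg_one _ _ (by simp)]
      rw [List.getLast_cons (pvGaps_ne_nil cs e t)]
      rw [← pv_pyGetD_neg_one _ "" (pvGaps_ne_nil cs e t)]
      have hlen' : t.length = rs'.length := by simpa using hlen
      have hih := ih rs' hlen' e
      simp only [List.zip_cons_cons, List.flatMap_cons, List.map_append, List.map_cons,
        List.append_assoc, pvInterleave]
      simpa using hih

-- B computes the interleave shape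
theorem pvB_eq (s : String) (ps : List (Int × Int)) (rs : List String)
    (hlen : ps.length = rs.length) :
    string_repl_positions_alt s ps rs = String.ofList (pvInterleave s.toList 0 ps rs) := by
  apply String.toList_injective
  simp only [string_repl_positions_alt]
  rw [pv_join_nil, PySem.List.foldl_append_eq_flatMap]
  have hg : ((( (0:Int) :: ps.map (fun p => p.2)).zip (ps.map (fun p => p.1) ++ [(s.toList.length : Int)])).map
      (fun ab => String.ofList (PySem.List.slice s.toList (some ab.1) (some ab.2)))) = pvGaps s.toList 0 ps := rfl
  rw [hg]
  have := pvB_core s.toList ps rs hlen 0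
  simpa using this

-- A's loop computes the interleave shape
theorem pvA_loop (cs : List Char) (ps : List (Int × Int)) (rs : List String)
    (hlen : ps.length = rs.length) :
    ∀ (k j : Nat), ps.length = j + k → ∀ (ret : List Char) (x : Int),
    ((PySem.List.pyRange (j : Int) (ps.length : Int) 1).foldl (pvStepA cs ps rs) (ret, x)).1
      ++ PySem.List.slice cs
          (some ((PySem.List.pyRange (j : Int) (ps.length : Int) 1).foldl (pvStepA cs ps rs) (ret, x)).2) none
      = ret ++ pvInterleave cs x (ps.drop j) (rs.drop j) := by
  intro k
  induction k with
  | zero =>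
    intro j hj ret x
    have hje : j = ps.length := by omega
    subst hje
    rw [PySem.List.pyRange_one_eq_nil (by omega)]
    rw [List.drop_length, hlen, List.drop_length]
    simp [pvInterleave]
  | succ n ih =>
    intro j hj ret x
    have hjlt : j < ps.length := by omega
    have hjlt' : j < rs.length := by omega
    rw [PySem.List.pyRange_one_cons (by exact_mod_cast hjlt)]
    rw [List.foldl_cons]
    have hstep : pvStepA cs ps rs (ret, x) (j : Int) =
        (ret ++ PySem.List.slice cs (some x) (some (ps[j].1)) ++ (rs[j]).toList, ps[j].2) := by
      simp [pvStepA, PySem.List.pyGetD_natCast, List.getElem?_eq_getElem hjlt,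
        List.getElem?_eq_getElem hjlt', List.getD]
    rw [hstep]
    have hcast : ((j : Int) + 1) = (((j + 1 : Nat)) : Int) := by push_cast; ring
    rw [hcast, ih (j + 1) (by omega)]
    rw [← List.getElem_cons_drop hjlt, ← List.getElem_cons_drop hjlt']
    rcases hp : ps[j] with ⟨st, e⟩
    simp [pvInterleave, List.append_assoc]

-- ===== VERDICT (by name: the statement is the Claim_ definition above) =====
theorem string_repl_positions_spec : Claim_equal_string_repl_positions := by
  intro s ps rs hdom hpre
  unfold Spec_string_repl_positions
  rw [pvB_eq s ps rs hpre]
  simp only [string_repl_positions]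
  have h := pvA_loop s.toList ps rs hpre ps.length 0 (by omega) [] 0
  simp only [Nat.cast_zero, List.drop_zero, List.nil_append] at h
  rw [h]
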